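-- pv_equiv track=rewrite | github.com/JacobEverly/IoT-Nexus | py_cc/utils.py | oidFromHex
-- ===== SOURCE A (Python) =====
-- def oidFromHex(hexadecimal):
--     firstByte, remainingBytes = hexadecimal[:2], hexadecimal[2:]
--     firstByteInt = intFromHex(firstByte)
--     oid = [firstByteInt // 40, firstByteInt % 40]
--     oidInt = 0
--     while len(remainingBytes) > 0:
--         byte, remainingBytes = remainingBytes[0:2], remainingBytes[2:]
--         byteInt = intFromHex(byte)
--         if byteInt >= 128:
--             oidInt = (128 * oidInt) + (byteInt - 128)
--             continue
--         oidInt = (128 * oidInt) + byteInt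
--         oid.append(oidInt)
--         oidInt = 0
--     return oid
--
-- def intFromHex(hexadecimal):
--     return int(hexadecimal, 16)
-- ===== SOURCE B (Python) =====
-- def _hexInt(chunk):
--     value = 0
--     for ch in chunk:
--         value = 16 * value + int(ch, 16)
--     return value
--
-- def _chunkPairs(s):
--     pairs = []
--     while s:
--         pairs.append(s[:2])
--         s = s[2:]
--     return pairs
--
-- def _groupInt(group):
--     value = 0
--     for b in group:
--         value = 128 * value + (b % 128)
--     return value
--
-- def oidFromHex(hexadecimal):
--     pairs = _chunkPairs(hexadecimal)
--     first = _hexInt(pairs[0])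
--     groups = []
--     current = []
--     for v in [_hexInt(p) for p in pairs[1:]]:
--         current.append(v)
--         if v < 128:
--             groups.append(current)
--             current = []
--     return [first // 40, first % 40] + [_groupInt(g) for g in groups]
-- ===== Notes on version B (the rewrite author's own statement) =====
-- stated objective: alternative
-- what changed: Replaces A's single fused while-loop with a running varint accumulator by a three-phase pipeline: chunk the string into byte pairs, group the byte values into complete varint groups (discarding an unterminated trailing group), then map each group to its integer by a fold; hex digits are parsed per character instead of per chunk via int(.,16).
-- outside the precondition, e.g. on oidFromHex(' 7'): A returns [0, 7], B raises ValueError; on oidFromHex('+1'): A returns [0, 1], B raises ValueError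
import Mathlib
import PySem

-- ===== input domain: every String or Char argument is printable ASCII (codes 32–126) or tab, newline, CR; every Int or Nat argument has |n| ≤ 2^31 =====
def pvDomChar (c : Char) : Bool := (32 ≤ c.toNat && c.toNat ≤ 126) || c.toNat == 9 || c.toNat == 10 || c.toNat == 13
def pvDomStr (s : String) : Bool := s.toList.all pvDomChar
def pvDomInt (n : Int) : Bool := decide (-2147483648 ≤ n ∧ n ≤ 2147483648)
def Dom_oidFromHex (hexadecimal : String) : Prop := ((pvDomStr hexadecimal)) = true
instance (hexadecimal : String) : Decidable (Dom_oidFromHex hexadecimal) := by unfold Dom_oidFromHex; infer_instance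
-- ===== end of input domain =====

-- B re-structures A's fused varint while-loop into a chunk / group / fold pipeline (same value on
-- every pure-hex input; alternative decomposition, no speed claim).

-- ===== PORT A =====
def intFromHexA (cs : List Char) : Option Int := PySem.Int.ofCharsBase? cs 16

def oidLoopA : List Char → Int → List Int → List Int
  | [], _, oid => oid
  | c :: cs, oidInt, oid =>
    let byte := PySem.List.slice (c :: cs) (some 0) (some 2)
    let rest := PySem.List.slice (c :: cs) (some 2) none
    match intFromHexA byte with
    | none => oid      -- int(byte, 16) raises ValueError here; such inputs lie outside Pre_
    | some byteInt =>
      if byteInt ≥ 128 then oidLoopA rest (128 * oidInt + (byteInt - 128)) oid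
      else oidLoopA rest 0 (oid ++ [128 * oidInt + byteInt])
  termination_by rest => rest.length
  decreasing_by
    all_goals
      rw [PySem.List.slice_from]
      simp
      omega

def oidFromHex (hexadecimal : String) : List Int :=
  let cs := hexadecimal.toList
  let firstByte := PySem.List.slice cs none (some 2)
  let remainingBytes := PySem.List.slice cs (some 2) none
  match intFromHexA firstByte with
  | none => []       -- int(firstByte, 16) raises ValueError; outside Pre_
  | some firstByteInt =>
    oidLoopA remainingBytes 0
      [PySem.Int.floordiv firstByteInt 40, PySem.Int.mod firstByteInt 40]

-- ===== PORT B =====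
def hexIntB (chunk : List Char) : Option Int :=
  chunk.foldl (fun value ch =>
    match value, PySem.Int.ofCharsBase? [ch] 16 with
    | some v, some d => some (16 * v + d)
    | _, _ => none) (some 0)

def chunkPairsB : List Char → List (List Char)
  | [] => []
  | c :: cs =>
    PySem.List.slice (c :: cs) none (some 2) :: chunkPairsB (PySem.List.slice (c :: cs) (some 2) none)
  termination_by s => s.length
  decreasing_by
    rw [PySem.List.slice_from]
    simp
    omega

def groupsB (vals : List Int) : List (List Int) :=
  (vals.foldl (fun (st : List (List Int) × List Int) v =>
      let current := st.2 ++ [v]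
      if v < 128 then (st.1 ++ [current], []) else (st.1, current))
    ([], [])).1

def groupIntB (group : List Int) : Int :=
  group.foldl (fun value b => 128 * value + PySem.Int.mod b 128) 0

def oidFromHex_alt (hexadecimal : String) : List Int :=
  match chunkPairsB hexadecimal.toList with
  | [] => []          -- pairs[0] raises IndexError here; outside Pre_
  | p :: ps =>
    match hexIntB p with
    | none => []      -- int(ch, 16) raises ValueError; outside Pre_
    | some first =>
      let valsO := ps.map hexIntB
      if valsO.all Option.isSome then
        [PySem.Int.floordiv first 40, PySem.Int.mod first 40]
          ++ (groupsB valsO.reduceOption).map groupIntB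
      else []         -- a _hexInt call in the comprehension raises ValueError; outside Pre_

-- ===== PRECONDITION & SPEC =====
def hexCharsPre : List Char := "0123456789abcdefABCDEF".toList

-- Pre_ admits exactly the non-empty pure hex-digit strings. Excluded: the empty string and strings
-- with a non-hex character — there A raises ValueError in almost every case; on the few such strings
-- that int(…, 16) still accepts chunk-wise (whitespace or '+' inside a 2-char chunk, e.g. ' 7') A
-- returns but B's per-character hex parsing raises, so they are excluded as well.
def Pre_oidFromHex (hexadecimal : String) : Prop :=
  hexadecimal.toList ≠ [] ∧ hexadecimal.toList.all (fun c => hexCharsPre.contains c) = true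
instance (hexadecimal : String) : Decidable (Pre_oidFromHex hexadecimal) := by
  unfold Pre_oidFromHex; infer_instance

def pvWitness_oidFromHex : String := "2b0601040182371514"

def Spec_oidFromHex (hexadecimal : String) (out : List Int) : Prop := out = oidFromHex_alt hexadecimal
instance (hexadecimal : String) (out : List Int) : Decidable (Spec_oidFromHex hexadecimal out) := by
  unfold Spec_oidFromHex; infer_instance

-- ===== CLAIM (what is proved, stated in full; the proofs are below) =====
def Claim_equal_oidFromHex : Prop := ∀ (hexadecimal : String), Dom_oidFromHex hexadecimal → Pre_oidFromHex hexadecimal → Spec_oidFromHex hexadecimal (oidFromHex hexadecimal)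

-- ===== LEMMAS AND PROOFS =====

-- value of one hex digit character
def hv (c : Char) : Int :=
  if c.toNat ≤ 57 then (c.toNat : Int) - 48 else ((c.toNat % 32 : Nat) : Int) + 9

-- the common chunking of a string into 2-character pieces
def chunk2 : List Char → List (List Char)
  | [] => []
  | c :: cs => (c :: cs.take 1) :: chunk2 (cs.drop 1)
  termination_by s => s.length
  decreasing_by simp

def chunkVal : List Char → Int
  | [] => 0
  | [c] => hv c
  | c :: d :: _ => 16 * hv c + hv d

-- A's loop on the abstract list of chunk values
def loopVals : List Int → Int → List Int → List Int
  | [], _, oid => oid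
  | v :: vs, oidInt, oid =>
    if v ≥ 128 then loopVals vs (128 * oidInt + (v - 128)) oid
    else loopVals vs 0 (oid ++ [128 * oidInt + v])

-- B's grouping, recursively
def groupsRec : List Int → List Int → List (List Int)
  | [], _ => []
  | v :: vs, cur =>
    if v < 128 then (cur ++ [v]) :: groupsRec vs [] else groupsRec vs (cur ++ [v])

lemma hex1b : (hexCharsPre.all fun c =>
    (PySem.Int.ofCharsBase? [c] 16 == some (hv c)) && decide (0 ≤ hv c) && decide (hv c < 16)) = true := by rfl

lemma hex1 : ∀ c ∈ hexCharsPre,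
    PySem.Int.ofCharsBase? [c] 16 = some (hv c) ∧ 0 ≤ hv c ∧ hv c < 16 := by
  have h := hex1b
  simp only [List.all_eq_true, Bool.and_eq_true, beq_iff_eq, decide_eq_true_eq] at h
  exact fun c hc => ⟨(h c hc).1.1, (h c hc).1.2, (h c hc).2⟩

lemma hex2b : (hexCharsPre.all fun c => hexCharsPre.all fun d =>
    PySem.Int.ofCharsBase? [c, d] 16 == some (16 * hv c + hv d)) = true := by rfl

lemma hex2 : ∀ c ∈ hexCharsPre, ∀ d ∈ hexCharsPre,
    PySem.Int.ofCharsBase? [c, d] 16 = some (16 * hv c + hv d) := by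
  have h := hex2b
  simp only [List.all_eq_true, beq_iff_eq] at h
  exact h

lemma chunkPairsB_eq (s : List Char) : chunkPairsB s = chunk2 s := by
  induction s using chunkPairsB.induct with
  | case1 => simp [chunkPairsB, chunk2]
  | case2 c cs ih =>
    rw [PySem.List.slice_from] at ih
    rw [chunkPairsB, chunk2, PySem.List.slice_to, PySem.List.slice_from]
    · simpa using ih
    · norm_num
    · norm_num
    · norm_num

-- every chunk of a pure-hex string parses, identically, under both parsers, to a byte value
lemma chunk2_props (s : List Char) :
    s.all (fun c => hexCharsPre.contains c) = true →
    ∀ g ∈ chunk2 s, intFromHexA g = some (chunkVal g) ∧ hexIntB g = some (chunkVal g) ∧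
      0 ≤ chunkVal g ∧ chunkVal g < 256 := by
  induction s using chunk2.induct with
  | case1 => intro _ g hg; rw [chunk2] at hg; simp at hg
  | case2 c cs ih =>
    intro h
    simp only [List.all_cons, Bool.and_eq_true] at h
    have hc : c ∈ hexCharsPre := by simpa using h.1
    have h1 := hex1 c hc
    cases cs with
    | nil =>
      intro g hg
      rw [chunk2] at hg
      simp only [List.take_nil, List.drop_nil,
        show chunk2 [] = [] from by rw [chunk2], List.mem_cons, List.not_mem_nil, or_false] at hg
      subst hg
      refine ⟨by simp [intFromHexA, chunkVal, h1.1], by simp [hexIntB, chunkVal, h1.1], ?_, ?_⟩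
      · simp only [chunkVal]; exact h1.2.1
      · simp only [chunkVal]; have := h1.2.2; omega
    | cons d cs' =>
      have h2' := h.2
      simp only [List.all_cons, Bool.and_eq_true] at h2'
      have hd : d ∈ hexCharsPre := by simpa using h2'.1
      have h2 := hex2 c hc d hd
      have hdv := hex1 d hd
      simp only [List.drop_succ_cons, List.drop_zero] at ih
      intro g hg
      rw [chunk2] at hg
      simp only [List.take_succ_cons, List.take_zero, List.drop_succ_cons, List.drop_zero] at hg
      rcases List.mem_cons.mp hg with hg | hg
      · subst hg
        refine ⟨by simp [intFromHexA, chunkVal, h2], ?_, ?_, ?_⟩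
        · simp only [hexIntB, chunkVal, List.foldl_cons, List.foldl_nil, h1.1, hdv.1]
          norm_num
        · simp only [chunkVal]; have := h1.2; have := hdv.2; omega
        · simp only [chunkVal]; have := h1.2; have := hdv.2; omega
      · exact ih h2'.2 g hg

lemma loopA_eq (rest : List Char) :
    (∀ g ∈ chunk2 rest, intFromHexA g = some (chunkVal g)) → ∀ (oidInt : Int) (oid : List Int),
    oidLoopA rest oidInt oid = loopVals ((chunk2 rest).map chunkVal) oidInt oid := by
  induction rest using chunk2.induct with
  | case1 => intro _ oidInt oid; simp [oidLoopA, chunk2, loopVals]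
  | case2 c cs ih =>
    intro h oidInt oid
    have e1 : PySem.List.slice (c :: cs) (some 0) (some 2) = c :: cs.take 1 := by
      rw [PySem.List.slice_zero_start, PySem.List.slice_to] <;> simp
    have e2 : PySem.List.slice (c :: cs) (some 2) none = cs.drop 1 := by
      rw [PySem.List.slice_from] <;> simp
    have hbyte : intFromHexA (c :: cs.take 1) = some (chunkVal (c :: cs.take 1)) := by
      refine h _ ?_
      rw [chunk2]; exact List.mem_cons_self ..
    have htail : ∀ g ∈ chunk2 (cs.drop 1), intFromHexA g = some (chunkVal g) := by
      intro g hg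
      refine h g ?_
      rw [chunk2]; exact List.mem_cons_of_mem _ hg
    rw [oidLoopA]
    simp only [e1, e2, hbyte]
    rw [show chunk2 (c :: cs) = (c :: cs.take 1) :: chunk2 (cs.drop 1) from by rw [chunk2]]
    simp only [List.map_cons, loopVals]
    split
    · exact ih htail _ _
    · exact ih htail _ _

lemma groupsB_foldl (vals : List Int) (gs : List (List Int)) (cur : List Int) :
    (vals.foldl (fun (st : List (List Int) × List Int) v =>
      let current := st.2 ++ [v]
      if v < 128 then (st.1 ++ [current], []) else (st.1, current)) (gs, cur)).1
      = gs ++ groupsRec vals cur := by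
  induction vals generalizing gs cur with
  | nil => simp [groupsRec]
  | cons v vs ih =>
    simp only [List.foldl_cons, groupsRec]
    by_cases h : v < 128 <;> simp [h, ih]

lemma groupsB_eq (vals : List Int) : groupsB vals = groupsRec vals [] := by
  simpa [groupsB] using groupsB_foldl vals [] []

lemma groupIntB_append (cur : List Int) (v : Int) :
    groupIntB (cur ++ [v]) = 128 * groupIntB cur + PySem.Int.mod v 128 := by
  simp [groupIntB, List.foldl_append]

lemma loopVals_group (vals : List Int) (hb : ∀ v ∈ vals, 0 ≤ v ∧ v < 256)
    (cur : List Int) (oid : List Int) :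
    loopVals vals (groupIntB cur) oid = oid ++ (groupsRec vals cur).map groupIntB := by
  induction vals generalizing cur oid with
  | nil => simp [loopVals, groupsRec]
  | cons v vs ih =>
    have hbv := hb v (by simp)
    have hbs : ∀ w ∈ vs, 0 ≤ w ∧ w < 256 := fun w hw => hb w (by simp [hw])
    have hmod : PySem.Int.mod v 128 = if v ≥ 128 then v - 128 else v := by
      rw [PySem.Int.mod_eq_emod_of_pos (by norm_num : (0:Int) < 128)]
      split <;> omega
    rw [loopVals, groupsRec]
    by_cases h : v ≥ 128
    · have h' : ¬ v < 128 := by omega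
      rw [if_pos h, if_neg h']
      have : 128 * groupIntB cur + (v - 128) = groupIntB (cur ++ [v]) := by
        rw [groupIntB_append, hmod, if_pos h]
      rw [this, ih hbs]
    · have h' : v < 128 := by omega
      rw [if_neg h, if_pos h']
      have : 128 * groupIntB cur + v = groupIntB (cur ++ [v]) := by
        rw [groupIntB_append, hmod, if_neg h]
      rw [this]
      have h0 : (0 : Int) = groupIntB [] := rfl
      rw [h0, ih hbs]
      simp

lemma map_hexIntB (l : List (List Char)) (h : ∀ g ∈ l, hexIntB g = some (chunkVal g)) :
    (l.map hexIntB).all Option.isSome = true ∧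
      (l.map hexIntB).reduceOption = l.map chunkVal := by
  induction l with
  | nil => simp
  | cons g gs ih =>
    have hg := h g (by simp)
    have ihs := ih (fun x hx => h x (by simp [hx]))
    simp [hg, ihs.1, ihs.2]

-- ===== VERDICT (by name: the statement is the Claim_ definition above) =====
theorem oidFromHex_spec : Claim_equal_oidFromHex := by
  intro hexadecimal _ hpre
  obtain ⟨hne, hall⟩ := hpre
  unfold Spec_oidFromHex oidFromHex oidFromHex_alt
  cases hcs : hexadecimal.toList with
  | nil => exact absurd hcs hne
  | cons c cs =>
    rw [hcs] at hall
    dsimp only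
    have hprops := chunk2_props (c :: cs) hall
    have e1 : PySem.List.slice (c :: cs) none (some 2) = c :: cs.take 1 := by
      rw [PySem.List.slice_to] <;> simp
    have e2 : PySem.List.slice (c :: cs) (some 2) none = cs.drop 1 := by
      rw [PySem.List.slice_from] <;> simp
    have hchunks : chunk2 (c :: cs) = (c :: cs.take 1) :: chunk2 (cs.drop 1) := by rw [chunk2]
    have hhead : (c :: cs.take 1) ∈ chunk2 (c :: cs) := by rw [hchunks]; exact List.mem_cons_self ..
    have hheadp := hprops _ hhead
    have htailp : ∀ g ∈ chunk2 (cs.drop 1), intFromHexA g = some (chunkVal g) ∧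
        hexIntB g = some (chunkVal g) ∧ 0 ≤ chunkVal g ∧ chunkVal g < 256 := by
      intro g hg
      exact hprops g (by rw [hchunks]; exact List.mem_cons_of_mem _ hg)
    have hmap := map_hexIntB (chunk2 (cs.drop 1)) (fun g hg => (htailp g hg).2.1)
    rw [e1, e2, hheadp.1, chunkPairsB_eq, hchunks]
    dsimp only
    rw [hheadp.2.1]
    dsimp only
    -- A side
    rw [loopA_eq (cs.drop 1) (fun g hg => (htailp g hg).1)]
    have hb : ∀ v ∈ (chunk2 (cs.drop 1)).map chunkVal, 0 ≤ v ∧ v < 256 := by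
      intro v hv
      rcases List.mem_map.mp hv with ⟨g, hg, rfl⟩
      exact ⟨(htailp g hg).2.2.1, (htailp g hg).2.2.2⟩
    have h0 : (0 : Int) = groupIntB [] := rfl
    rw [h0, loopVals_group _ hb]
    -- B side
    simp only [hmap.1, if_true, hmap.2, groupsB_eq]
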